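-- pv_equiv track=rewrite | github.com/alexandraback/datacollection | solutions_5634697451274240_0/Python/Clarissa/pancake_flip.py | calculate_minimum_flips_to_happy
-- ===== SOURCE A (Python) =====
-- def calculate_minimum_flips_to_happy(pancake_stack):
--     """
--     Determines the minimum number of flips needed to get a string of +s and -s
--     to a string of all +s, where any flips must be done for all characters 1:k
--
--     param: pancake_stack, a stack of pancakes represented as a string of + and -
--     return: the minimum number of flips needed to get to all +
--     """
--     count = 0
--     first_pancake_streak = True
--     current_streak_mood = None
--     HAPPY = '+'
--     SAD = '-'
--
--     for pancake in pancake_stack: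
--         # If we're in the same streak, just keep going
--         if current_streak_mood == pancake:
--             continue
--
--         # Otherwise we just changed polarity
--         else:
--             current_streak_mood = pancake
--
--             # If we found a streak of sad pancakes, we have to fix them!
--             if current_streak_mood == SAD:
--                 # It's easier to fix pancakes at the beginning.
--                 if first_pancake_streak:
--                     count += 1
--                 else:
--                     count += 2
--
--             first_pancake_streak = False
--
--     return count
-- ===== SOURCE B (Python) =====
-- def calculate_minimum_flips_to_happy(pancake_stack):
--     """Classic boundary-counting formula: project each pancake to sad/not-sad,
--     count adjacent positions where sadness changes, and add one flip if the
--     bottom-of-pass (last) pancake is still sad. Each sadness boundary needs one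
--     flip to merge the runs, and a final flip fixes a sad tail."""
--     sad = [ch == '-' for ch in pancake_stack]
--     flips = sum(1 for a, b in zip(sad, sad[1:]) if a != b)
--     return flips + (1 if sad and sad[-1] else 0)
-- ===== Notes on version B (the rewrite author's own statement) =====
-- stated objective: alternative
-- what changed: B replaces A's streak state machine (mood + first-streak flag, adding 1 or 2 per sad run) by the boundary-counting formula: project to a sad/not-sad boolean list, count adjacent sadness changes via zip with the shifted list, and add 1 if the last pancake is sad.
import Mathlib
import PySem

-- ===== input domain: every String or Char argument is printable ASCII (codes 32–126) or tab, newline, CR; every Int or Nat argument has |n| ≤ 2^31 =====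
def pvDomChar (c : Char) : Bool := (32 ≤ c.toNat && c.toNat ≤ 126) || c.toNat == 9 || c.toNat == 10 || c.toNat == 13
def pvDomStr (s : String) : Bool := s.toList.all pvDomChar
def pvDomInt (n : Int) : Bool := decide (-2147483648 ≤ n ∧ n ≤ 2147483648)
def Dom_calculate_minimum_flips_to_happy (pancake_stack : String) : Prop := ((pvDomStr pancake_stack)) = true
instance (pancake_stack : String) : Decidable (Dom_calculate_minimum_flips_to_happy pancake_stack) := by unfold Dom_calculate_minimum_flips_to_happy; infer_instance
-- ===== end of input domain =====

-- B replaces A's streak state machine by the boundary-counting formula (adjacent sadness changes + sad tail); objective: alternative.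


-- ===== PORT A =====
-- state: (count, first_pancake_streak, current_streak_mood)
def pvStepA (st : Int × Bool × Option Char) (pancake : Char) : Int × Bool × Option Char :=
  match st with
  | (count, first_pancake_streak, current_streak_mood) =>
    if current_streak_mood = some pancake then
      (count, first_pancake_streak, current_streak_mood)
    else
      let current_streak_mood := some pancake
      let count :=
        if current_streak_mood = some '-' then
          if first_pancake_streak then count + 1 else count + 2
        else count
      (count, false, current_streak_mood)

def calculate_minimum_flips_to_happy (pancake_stack : String) : Int :=
  (pancake_stack.toList.foldl pvStepA (0, true, none)).1

-- ===== PORT B =====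
def calculate_minimum_flips_to_happy_alt (pancake_stack : String) : Int :=
  let sad := pancake_stack.toList.map (fun ch => ch == '-')
  let flips : Int := ((sad.zip sad.tail).countP (fun p => p.1 != p.2) : Nat)
  flips + (if sad.getLast? = some true then 1 else 0)

-- ===== PRECONDITION & SPEC =====
def Spec_calculate_minimum_flips_to_happy (pancake_stack : String) (out : Int) : Prop := out = calculate_minimum_flips_to_happy_alt pancake_stack
instance (pancake_stack : String) (out : Int) : Decidable (Spec_calculate_minimum_flips_to_happy pancake_stack out) := by unfold Spec_calculate_minimum_flips_to_happy; infer_instance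

-- ===== CLAIM (what is proved, stated in full; the proofs are below) =====
def Claim_equal_calculate_minimum_flips_to_happy : Prop := ∀ (pancake_stack : String), Dom_calculate_minimum_flips_to_happy pancake_stack → Spec_calculate_minimum_flips_to_happy pancake_stack (calculate_minimum_flips_to_happy pancake_stack)

-- ===== LEMMAS AND PROOFS =====

-- g p l: boundary count of the suffix l given previous character p, plus a sad-tail indicator.
def pvG (p : Char) : List Char → Int
  | [] => if p = '-' then 1 else 0
  | c :: l => (if (decide (p = '-')) ≠ (decide (c = '-')) then 1 else 0) + pvG c l

-- A's loop, resumed after the first streak, computes pvG minus the indicator for p itself.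
lemma loopA_eq_g (l : List Char) (ca : Int) (p : Char) :
    (l.foldl pvStepA (ca, false, some p)).1
      = ca + pvG p l - (if p = '-' then 1 else 0) := by
  induction l generalizing ca p with
  | nil => simp [pvG]
  | cons c l ih =>
    simp only [List.foldl]
    by_cases h : p = c
    · subst h
      have hA : pvStepA (ca, false, some p) p = (ca, false, some p) := by simp [pvStepA]
      rw [hA, ih ca p]
      simp [pvG]
    · by_cases hc : c = '-'
      · subst hc
        have hp : ¬ p = '-' := h
        have hA : pvStepA (ca, false, some p) '-' = (ca + 2, false, some '-') := by
          simp [pvStepA, h]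
        rw [hA, ih (ca + 2) '-']
        simp [pvG, hp]; ring
      · have hA : pvStepA (ca, false, some p) c = (ca, false, some c) := by
          simp [pvStepA, h, hc]
        rw [hA, ih ca c]
        by_cases hp : p = '-' <;> · simp [pvG, hp, hc]; try ring
    
-- B's expression on a nonempty list equals pvG of head and tail.
lemma alt_eq_g (c : Char) (l : List Char) :
    ((((((c :: l).map (fun ch => ch == '-')).zip (((c :: l).map (fun ch => ch == '-')).tail)).countP
        (fun p => p.1 != p.2) : Nat) : Int)
      + (if ((c :: l).map (fun ch => ch == '-')).getLast? = some true then 1 else 0))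
      = pvG c l := by
  induction l generalizing c with
  | nil => by_cases hc : c = '-' <;> simp [pvG, hc]
  | cons d l ih =>
    have H := ih d
    simp only [List.map_cons, List.tail_cons, List.zip_cons_cons, List.countP_cons,
               List.getLast?_cons_cons] at H ⊢
    by_cases hL : ((d == '-') :: l.map (fun ch => ch == '-')).getLast? = some true <;>
      by_cases h1 : c = '-' <;> by_cases h2 : d = '-' <;>
        simp [pvG, h1, h2, hL] at H ⊢ <;> omega

theorem calculate_minimum_flips_to_happy_spec : Claim_equal_calculate_minimum_flips_to_happy := by
  intro s _
  unfold Spec_calculate_minimum_flips_to_happy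
  unfold calculate_minimum_flips_to_happy
  cases hl : s.toList with
  | nil => simp [calculate_minimum_flips_to_happy_alt, hl]
  | cons c l =>
    have halt : calculate_minimum_flips_to_happy_alt s = pvG c l := by
      unfold calculate_minimum_flips_to_happy_alt
      rw [hl]
      exact alt_eq_g c l
    rw [halt]
    simp only [List.foldl]
    by_cases hc : c = '-'
    · subst hc
      have hA : pvStepA (0, true, none) '-' = (1, false, some '-') := by decide
      rw [hA, loopA_eq_g l 1 '-']
      simp
    · have hA : pvStepA (0, true, none) c = (0, false, some c) := by
        simp [pvStepA, hc]
      rw [hA, loopA_eq_g l 0 c]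
      simp [hc]
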